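-- pv_equiv track=rewrite | github.com/PPinto22/LeetCode | kickstart/2020 Round C/d.py | solve
-- ===== SOURCE A (Python) =====
-- import math
--
-- def solve(N, Q, candies, queries):
--     def f1(i, value):
--         return (-1) ** (i - 1) * value
--
--     def f2(i, value):
--         return (-1) ** (i - 1) * value * i
--
--     def score(left, right):
--         sign = (-1) ** (left - 1)
--         big_area = tree2.query(left - 1, right - 1)
--         subtract_area = (left - 1) * tree1.query(left - 1, right - 1)
--         return sign * (big_area - subtract_area)
--
--     tree1 = SegmentTree([f1(i + 1, sweetness) for (i, sweetness) in enumerate(candies)])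
--     tree2 = SegmentTree([f2(i + 1, sweetness) for (i, sweetness) in enumerate(candies)])
--     answer = 0
--     for query in queries:
--         if query[0] == 'Q':
--             answer += score(query[1], query[2])
--         elif query[0] == 'U':
--             tree1.update(query[1] - 1, f1(query[1], query[2]))
--             tree2.update(query[1] - 1, f2(query[1], query[2]))
--     return answer
--
-- class SegmentTree:
--     def __init__(self, values):
--         self.n = None
--         self.t = None
--         self.build(values)
--
--     def build(self, values):
--         self.n = 2 ** math.ceil(math.log2(len(values)))
--         self.t = [0] * (2 * self.n - 1)
--         for i, leaf in enumerate(values):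
--             self.t[self.n - 1 + i] = leaf
--         for i in reversed(range(self.n - 1)):
--             self.t[i] = self.t[2 * i + 1] + self.t[2 * i + 2]
--
--     def query(self, left, right):
--         l = left + self.n - 1
--         r = right + self.n - 1
--         answer = 0
--         while l <= r:
--             if l % 2 == 0:
--                 answer += self.t[l]
--                 l += 1
--             if r % 2 == 1:
--                 answer += self.t[r]
--                 r -= 1
--             l = (l - 1) // 2
--             r = (r - 1) // 2
--         return answer
--
--     def update(self, index, value):
--         i = index + self.n - 1
--         delta = value - self.t[i]
--         while i >= 0:
--             self.t[i] += delta
--             i = (i - 1) // 2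
-- ===== SOURCE B (Python) =====
-- def solve(N, Q, candies, queries):
--     vals = list(candies)
--     answer = 0
--     for tag, a, b in queries:
--         if tag == 'Q':
--             total = 0
--             s = 1
--             for i in range(a, b + 1):
--                 total += s * vals[i - 1] * (i - a + 1)
--                 s = -s
--             answer += total
--         elif tag == 'U':
--             vals[a - 1] = b
--     return answer
-- ===== Notes on version B (the rewrite author's own statement) =====
-- stated objective: simpler
-- what changed: B drops the SegmentTree class entirely: it keeps the plain candy list, answers each 'Q a b' by one direct scan over candies[a-1..b-1] with an alternating sign and weight (i-a+1), and performs 'U' as a plain list assignment.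
-- outside the precondition, e.g. on solve(1, 1, [5, 7, 9], [('Q', 4, 4)]): A returns 0, B raises IndexError; on solve(1, 1, [5, 7, 9], [('U', 4, 2)]): A returns 0, B raises IndexError; on solve(1, 1, [5], [('Q', 0, -1)]): A returns 0.0, B returns 0
import Mathlib
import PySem

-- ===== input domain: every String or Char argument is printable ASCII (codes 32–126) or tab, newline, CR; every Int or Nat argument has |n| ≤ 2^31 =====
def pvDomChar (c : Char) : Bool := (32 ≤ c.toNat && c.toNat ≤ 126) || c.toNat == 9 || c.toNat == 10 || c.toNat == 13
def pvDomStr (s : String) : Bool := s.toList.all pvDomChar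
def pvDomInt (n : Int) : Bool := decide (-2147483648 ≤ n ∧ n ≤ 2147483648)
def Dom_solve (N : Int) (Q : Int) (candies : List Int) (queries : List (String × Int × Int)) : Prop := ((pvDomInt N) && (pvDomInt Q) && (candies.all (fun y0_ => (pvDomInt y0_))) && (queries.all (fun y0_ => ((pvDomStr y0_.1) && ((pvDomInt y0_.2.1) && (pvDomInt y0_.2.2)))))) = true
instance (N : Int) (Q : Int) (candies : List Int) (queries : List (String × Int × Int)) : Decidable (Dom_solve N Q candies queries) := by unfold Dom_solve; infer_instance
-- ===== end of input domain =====

-- B replaces A's two segment trees by the plain value list, answering each query by one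
-- direct alternating-weight scan (objective: simpler; no speed claim).

-- ===== PORT A =====
-- f1 / f2: (-1)**(i-1): Int power with toNat exponent, exact for i ≥ 1 (all call sites under Pre_ have i ≥ 1)
def aF1 (i value : Int) : Int := (-1 : Int) ^ (i - 1).toNat * value
def aF2 (i value : Int) : Int := (-1 : Int) ^ (i - 1).toNat * value * i

structure ASeg where
  n : Nat
  t : List Int

-- 'for i in reversed(range(n-1)): t[i] = t[2i+1] + t[2i+2]' (indices always in range here, so getD is exact)
def aBuildFold (t : List Int) : Nat → List Int
  | 0 => t
  | c + 1 => aBuildFold (t.set c (t.getD (2*c+1) 0 + t.getD (2*c+2) 0)) c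

-- SegmentTree.build: self.n = 2**ceil(log2(len)); Nat.clog 2 is exactly ceil(log2 ·) on len ≥ 1
-- (Pre_ requires candies ≠ []; on [] the Python raises in math.log2(0))
def aBuild (values : List Int) : ASeg :=
  let n : Nat := 2 ^ Nat.clog 2 values.length
  let t0 : List Int := List.replicate (2*n - 1) 0
  -- 'for i, leaf in enumerate(values): t[n - 1 + i] = leaf'
  let t1 := values.zipIdx.foldl (fun t p => t.set (n - 1 + p.2) p.1) t0
  ⟨n, aBuildFold t1 (n - 1)⟩

-- SegmentTree.query's while loop; t[l] / t[r] via pyGetD (in range under Pre_)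
def aQueryLoop (t : List Int) (l r answer : Int) : Int :=
  if _h : l ≤ r then
    let a1 := if PySem.Int.mod l 2 = 0 then answer + PySem.List.pyGetD t l 0 else answer
    let l1 := if PySem.Int.mod l 2 = 0 then l + 1 else l
    let a2 := if PySem.Int.mod r 2 = 1 then a1 + PySem.List.pyGetD t r 0 else a1
    let r1 := if PySem.Int.mod r 2 = 1 then r - 1 else r
    aQueryLoop t (PySem.Int.floordiv (l1 - 1) 2) (PySem.Int.floordiv (r1 - 1) 2) a2
  else answer
termination_by (r - l + 2).toNat
decreasing_by
  simp only [PySem.Int.floordiv_eq_ediv_of_pos (by norm_num : (0:Int) < 2)]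
  rcases Int.emod_two_eq l with hl | hl <;> rcases Int.emod_two_eq r with hr | hr <;>
    simp [PySem.Int.mod_eq_emod_of_pos (by norm_num : (0:Int) < 2), hl, hr] <;> omega

def aQuery (s : ASeg) (left right : Int) : Int :=
  aQueryLoop s.t (left + (s.n : Int) - 1) (right + (s.n : Int) - 1) 0

-- SegmentTree.update's while loop
def aUpdLoop (t : List Int) (i delta : Int) : List Int :=
  if _h : 0 ≤ i then
    aUpdLoop (PySem.List.pySetD t i (PySem.List.pyGetD t i 0 + delta)) (PySem.Int.floordiv (i - 1) 2) delta
  else t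
termination_by (i + 1).toNat
decreasing_by
  simp only [PySem.Int.floordiv_eq_ediv_of_pos (by norm_num : (0:Int) < 2)]
  omega

def aUpdate (s : ASeg) (index value : Int) : ASeg :=
  let i := index + (s.n : Int) - 1
  let delta := value - PySem.List.pyGetD s.t i 0
  ⟨s.n, aUpdLoop s.t i delta⟩

-- score(left, right); sign = (-1)**(left-1), exact for left ≥ 1 (Pre_)
def aScore (tree1 tree2 : ASeg) (left right : Int) : Int :=
  let sign : Int := (-1 : Int) ^ (left - 1).toNat
  let big_area := aQuery tree2 (left - 1) (right - 1)
  let subtract_area := (left - 1) * aQuery tree1 (left - 1) (right - 1)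
  sign * (big_area - subtract_area)

def solve (N : Int) (Q : Int) (candies : List Int) (queries : List (String × Int × Int)) : Int :=
  let tree1 := aBuild (candies.zipIdx.map (fun p => aF1 ((p.2 : Int) + 1) p.1))
  let tree2 := aBuild (candies.zipIdx.map (fun p => aF2 ((p.2 : Int) + 1) p.1))
  let st := queries.foldl (fun (st : ASeg × ASeg × Int) q =>
      if q.1 = "Q" then
        (st.1, st.2.1, st.2.2 + aScore st.1 st.2.1 q.2.1 q.2.2)
      else if q.1 = "U" then
        (aUpdate st.1 (q.2.1 - 1) (aF1 q.2.1 q.2.2),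
         aUpdate st.2.1 (q.2.1 - 1) (aF2 q.2.1 q.2.2),
         st.2.2)
      else st) (tree1, tree2, 0)
  st.2.2

-- ===== PORT B =====
-- Source B: keep the raw value list; per 'Q a b' one scan over range(a, b+1) with an alternating
-- sign s and weight (i - a + 1); per 'U a v' set vals[a-1] = v.  vals[i-1] via pyGetD/pySetD
-- (exact under Pre_, where all accessed indices are in range).
def solve_alt (N : Int) (Q : Int) (candies : List Int) (queries : List (String × Int × Int)) : Int :=
  let st := queries.foldl (fun (st : List Int × Int) q =>
      if q.1 = "Q" then
        let p := (PySem.List.pyRange q.2.1 (q.2.2 + 1) 1).foldl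
          (fun (p : Int × Int) i => (p.1 + p.2 * PySem.List.pyGetD st.1 (i - 1) 0 * (i - q.2.1 + 1), -p.2))
          (0, 1)
        (st.1, st.2 + p.1)
      else if q.1 = "U" then
        (PySem.List.pySetD st.1 (q.2.1 - 1) q.2.2, st.2)
      else st) (candies, 0)
  st.2

-- ===== PRECONDITION & SPEC =====
-- Pre_ excludes inputs where the Python A raises or leaves Int: empty candies (math.log2(0)
-- raises ValueError), and 'Q'/'U' queries whose indices leave the candy array — there A
-- either raises IndexError, or returns a float (sign = (-1)**negative), or reads the tree's
-- accidental zero padding / wrapped negative indices, while Source B raises IndexError.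
-- (A 'Q a b' with a > b touches nothing in either program, so only 1 ≤ a is needed then.)
def Pre_solve (N : Int) (Q : Int) (candies : List Int) (queries : List (String × Int × Int)) : Prop :=
  candies ≠ [] ∧ ∀ q ∈ queries,
    (q.1 = "Q" → 1 ≤ q.2.1 ∧ (q.2.1 ≤ q.2.2 → q.2.2 ≤ (candies.length : Int))) ∧
    (q.1 = "U" → 1 ≤ q.2.1 ∧ q.2.1 ≤ (candies.length : Int))
instance (N : Int) (Q : Int) (candies : List Int) (queries : List (String × Int × Int)) : Decidable (Pre_solve N Q candies queries) := by unfold Pre_solve; infer_instance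

def pvWitness_solve : Int × Int × List Int × (List (String × Int × Int)) :=
  (3, 3, [5, -3, 7], [("Q", 1, 3), ("U", 2, 4), ("Q", 2, 3)])

def Spec_solve (N : Int) (Q : Int) (candies : List Int) (queries : List (String × Int × Int)) (out : Int) : Prop := out = solve_alt N Q candies queries
instance (N : Int) (Q : Int) (candies : List Int) (queries : List (String × Int × Int)) (out : Int) : Decidable (Spec_solve N Q candies queries out) := by unfold Spec_solve; infer_instance

-- ===== CLAIM (what is proved, stated in full; the proofs are below) =====
def Claim_equal_solve : Prop := ∀ (N : Int) (Q : Int) (candies : List Int) (queries : List (String × Int × Int)), Dom_solve N Q candies queries → Pre_solve N Q candies queries → Spec_solve N Q candies queries (solve N Q candies queries)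

-- ===== LEMMAS AND PROOFS =====

-- The abstract value of segment-tree node j over the leaf valuation F (n = 2^k leaves):
-- leaves sit at positions n-1 .. 2n-2, internal nodes sum their two children.
def nodeSum (F : Nat → Int) (n : Nat) (j : Nat) : Int :=
  if h : n - 1 ≤ j then F (j - (n - 1))
  else nodeSum F n (2*j+1) + nodeSum F n (2*j+2)
termination_by n - 1 - j
decreasing_by all_goals omega

-- t is a correct segment tree for leaf valuation F
def ValidT (F : Nat → Int) (n : Nat) (t : List Int) : Prop :=
  t.length = 2*n - 1 ∧ ∀ j < 2*n - 1, t.getD j 0 = nodeSum F n j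

-- sum of nodeSum over the block of m consecutive nodes starting at a
def blockS (F : Nat → Int) (n : Nat) (a m : Nat) : Int :=
  ((List.range m).map (fun i => nodeSum F n (a + i))).sum

-- the leaf valuation of tree j for current value list vals (0 beyond the list = the padding)
def leafF (f : Int → Int → Int) (vals : List Int) : Nat → Int :=
  fun idx => if idx < vals.length then f ((idx : Int) + 1) (vals.getD idx 0) else 0

-- j lies on the root path of e (parent = (e-1)/2)
def onPath (j : Nat) (e : Nat) : Bool :=
  if e = j then true
  else if e = 0 then false
  else onPath j ((e - 1) / 2)
termination_by e
decreasing_by omega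

lemma getD_set_eq (l : List Int) (i j : Nat) (v : Int) :
    (l.set i v).getD j 0 = if i = j ∧ i < l.length then v else l.getD j 0 := by
  simp only [List.getD_eq_getElem?_getD, List.getElem?_set]
  split_ifs with h1 h2 h3 <;> simp_all <;> omega

lemma onPath_le : ∀ (e j : Nat), onPath j e = true → j ≤ e := by
  intro e
  induction e using Nat.strong_induction_on with
  | _ e ih =>
    intro j h
    unfold onPath at h
    split at h
    · omega
    · split at h
      · simp at h
      · have := ih ((e - 1) / 2) (by omega) j h
        omega

lemma onPath_gt {e j : Nat} (h : e < j) : onPath j e = false := by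
  cases hc : onPath j e
  · rfl
  · have := onPath_le e j hc; omega

lemma onPath_self (e : Nat) : onPath e e = true := by
  unfold onPath; simp

lemma onPath_step {j e : Nat} (hne : e ≠ j) : onPath j e = onPath j ((e - 1) / 2) := by
  conv_lhs => rw [onPath]
  rw [if_neg hne]
  split
  · rename_i h0
    subst h0
    have hj : j ≠ 0 := fun h => hne h.symm
    unfold onPath
    simp [Ne.symm hj]
  · rfl

lemma onPath_children : ∀ (e j : Nat), j < e →
    onPath j e = (onPath (2*j+1) e || onPath (2*j+2) e) := by
  intro e
  induction e using Nat.strong_induction_on with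
  | _ e ih =>
    intro j hj
    by_cases h1 : e = 2*j+1
    · subst h1
      rw [onPath_step (by omega), show (2*j+1-1)/2 = j by omega, onPath_self]
      simp [onPath_self]
    · by_cases h2 : e = 2*j+2
      · subst h2
        rw [onPath_step (by omega), show (2*j+2-1)/2 = j by omega, onPath_self]
        rw [onPath_step (j := 2*j+1) (e := 2*j+2) (by omega), show (2*j+2-1)/2 = j by omega,
          onPath_gt (by omega), onPath_self]
        simp
      · have hp : (e - 1) / 2 ≠ j := by omega
        rw [onPath_step (by omega), onPath_step (j := 2*j+1) h1,
          onPath_step (j := 2*j+2) h2]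
        rcases Nat.lt_or_ge ((e-1)/2) j with hlt | hge
        · rw [onPath_gt hlt, onPath_gt (by omega), onPath_gt (by omega)]
          rfl
        · exact ih ((e-1)/2) (by omega) j (by omega)

lemma onPath_children_excl : ∀ (e j : Nat),
    ¬ (onPath (2*j+1) e = true ∧ onPath (2*j+2) e = true) := by
  intro e
  induction e using Nat.strong_induction_on with
  | _ e ih =>
    intro j ⟨h1, h2⟩
    by_cases he1 : e = 2*j+1
    · subst he1
      have := onPath_le _ _ h2; omega
    · by_cases he2 : e = 2*j+2
      · subst he2
        rw [onPath_step (j := 2*j+1) (e := 2*j+2) (by omega),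
          show (2*j+2-1)/2 = j by omega] at h1
        have := onPath_le _ _ h1; omega
      · by_cases he0 : e = 0
        · subst he0
          have := onPath_le _ _ h1; omega
        · rw [onPath_step he1] at h1
          rw [onPath_step he2] at h2
          exact ih ((e-1)/2) (by omega) j ⟨h1, h2⟩

-- point update of the leaf valuation changes nodeSum by the delta exactly on the root path of the leaf
lemma nodeSum_update (F : Nat → Int) (n i : Nat) (w : Int) (hn : 0 < n) (hi : i < n)
    (j : Nat) : nodeSum (fun idx => if idx = i then w else F idx) n j
      = nodeSum F n j + (if onPath j (n - 1 + i) = true then w - F i else 0) := by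
  by_cases hleaf : n - 1 ≤ j
  · have hL : nodeSum (fun idx => if idx = i then w else F idx) n j
        = (if j - (n-1) = i then w else F (j - (n-1))) := by
      conv_lhs => rw [nodeSum]
      rw [dif_pos hleaf]
    have hR : nodeSum F n j = F (j - (n-1)) := by
      conv_lhs => rw [nodeSum]
      rw [dif_pos hleaf]
    rw [hL, hR]
    by_cases hje : j = n - 1 + i
    · rw [show j - (n-1) = i by omega, if_pos rfl, hje, onPath_self, if_pos rfl]
      ring
    · rw [if_neg (show j - (n-1) ≠ i by omega)]
      have hpath : onPath j (n-1+i) = false := by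
        cases hc : onPath j (n-1+i)
        · rfl
        · rw [onPath_step (show n-1+i ≠ j from fun h => hje h.symm)] at hc
          have := onPath_le _ _ hc
          omega
      rw [hpath]; simp
  · have hL : nodeSum (fun idx => if idx = i then w else F idx) n j
        = nodeSum (fun idx => if idx = i then w else F idx) n (2*j+1)
          + nodeSum (fun idx => if idx = i then w else F idx) n (2*j+2) := by
      conv_lhs => rw [nodeSum]
      rw [dif_neg hleaf]
    have hR : nodeSum F n j = nodeSum F n (2*j+1) + nodeSum F n (2*j+2) := by
      conv_lhs => rw [nodeSum]
      rw [dif_neg hleaf]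
    rw [hL, hR]
    rw [nodeSum_update F n i w hn hi (2*j+1), nodeSum_update F n i w hn hi (2*j+2)]
    have hchild := onPath_children (n-1+i) j (by omega)
    have hexcl := onPath_children_excl (n-1+i) j
    cases hc1 : onPath (2*j+1) (n-1+i) <;> cases hc2 : onPath (2*j+2) (n-1+i) <;>
        rw [hc1, hc2] at hchild <;>
        simp only [Bool.false_or, Bool.or_false, Bool.or_self] at hchild <;>
        rw [hchild]
    · simp
    · simp only [Bool.false_eq_true, if_false, if_true]; ring
    · simp only [Bool.false_eq_true, if_false, if_true]; ring
    · exact absurd ⟨hc1, hc2⟩ hexcl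
termination_by n - 1 - j
decreasing_by all_goals omega

lemma updLoop_length (t : List Int) (i d : Int) : (aUpdLoop t i d).length = t.length := by
  rw [aUpdLoop]
  split
  · rw [updLoop_length, PySem.List.length_pySetD]
  · rfl
termination_by (i + 1).toNat
decreasing_by
  simp only [PySem.Int.floordiv_eq_ediv_of_pos (by norm_num : (0:Int) < 2)]
  omega

lemma updLoop_getD : ∀ (e : Nat) (t : List Int) (d : Int) (j : Nat),
    e < t.length → j < t.length →
    (aUpdLoop t (e : Int) d).getD j 0 = t.getD j 0 + (if onPath j e = true then d else 0) := by
  intro e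
  induction e using Nat.strong_induction_on with
  | _ e ih =>
    intro t d j he hj
    rw [aUpdLoop, dif_pos (by positivity)]
    have hset : PySem.List.pySetD t (e : Int) (PySem.List.pyGetD t (e : Int) 0 + d)
        = t.set e (t.getD e 0 + d) := by
      simp
    rcases Nat.eq_zero_or_pos e with he0 | hepos
    · subst he0
      have harg : PySem.Int.floordiv ((0:Nat) - 1) 2 = -1 := by
        rw [PySem.Int.floordiv_eq_ediv_of_pos (by norm_num)]; decide
      rw [show ((0:Nat):Int) - 1 = (-1 : Int) by norm_num] at harg ⊢
      rw [show PySem.Int.floordiv (-1) 2 = -1 from harg]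
      rw [aUpdLoop, dif_neg (by norm_num)]
      rw [hset, getD_set_eq]
      have : onPath j 0 = (decide (j = 0)) := by
        unfold onPath
        rcases Nat.eq_zero_or_pos j with h | h
        · subst h; simp
        · simp; omega
      rw [this]
      by_cases hj0 : j = 0
      · subst hj0; simp [hj]
      · simp [hj0, Ne.symm hj0]
    · have harg : PySem.Int.floordiv ((e:Int) - 1) 2 = (((e-1)/2 : Nat) : Int) := by
        rw [PySem.Int.floordiv_eq_ediv_of_pos (by norm_num)]; omega
      rw [harg]
      rw [ih ((e-1)/2) (by omega) _ d j (by rw [hset]; simp [List.length_set]; omega)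
        (by rw [hset]; simp [List.length_set]; omega)]
      rw [hset, getD_set_eq]
      by_cases hje : j = e
      · subst hje
        rw [if_pos ⟨rfl, hj⟩, onPath_self,
          show onPath j ((j-1)/2) = false from onPath_gt (by omega)]
        simp
      · rw [if_neg (by intro hcc; exact hje hcc.1.symm)]
        rw [onPath_step (show e ≠ j from fun h => hje h.symm)]

lemma setfold_length : ∀ (vs : List Int) (s : Nat) (t : List Int) (base : Nat),
    ((vs.zipIdx s).foldl (fun t p => t.set (base + p.2) p.1) t).length = t.length := by
  intro vs
  induction vs with
  | nil => intro s t base; rfl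
  | cons v vs ih =>
    intro s t base
    rw [List.zipIdx_cons, List.foldl_cons, ih]
    exact List.length_set ..

lemma setfold_getD : ∀ (vs : List Int) (s : Nat) (t : List Int) (base j : Nat),
    ((vs.zipIdx s).foldl (fun t p => t.set (base + p.2) p.1) t).getD j 0
      = if base + s ≤ j ∧ j < base + s + vs.length ∧ j < t.length
        then vs.getD (j - base - s) 0 else t.getD j 0 := by
  intro vs
  induction vs with
  | nil => intro s t base j; simp; intros; omega
  | cons v vs ih =>
    intro s t base j
    rw [List.zipIdx_cons, List.foldl_cons, ih]
    rw [List.length_set, getD_set_eq]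
    by_cases hj : j = base + s
    · subst hj
      by_cases hlen : base + s < t.length
      · simp [hlen]
      · simp [hlen]; try omega
    · by_cases hwin : base + (s+1) ≤ j ∧ j < base + (s+1) + vs.length ∧ j < t.length
      · rw [if_pos hwin, if_pos (show base + s ≤ j ∧ j < base + s + (v :: vs).length ∧ j < t.length by
          simp only [List.length_cons]; omega)]
        have : j - base - s = (j - base - (s+1)) + 1 := by omega
        rw [this, List.getD_cons_succ]
      · rw [if_neg hwin,
          if_neg (show ¬(base + s = j ∧ base + s < t.length) from fun h => hj h.1.symm),
          if_neg (show ¬(base + s ≤ j ∧ j < base + s + (v :: vs).length ∧ j < t.length) from by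
            simp only [List.length_cons]; intro h; exact hwin (by omega))]

lemma buildFold_length : ∀ (c : Nat) (t : List Int), (aBuildFold t c).length = t.length := by
  intro c
  induction c with
  | zero => intro t; rfl
  | succ c ih => intro t; rw [aBuildFold, ih]; exact List.length_set ..

lemma buildFold_getD (F : Nat → Int) (n : Nat) : ∀ (c : Nat) (t : List Int),
    c ≤ n - 1 → t.length = 2*n - 1 →
    (∀ j, c ≤ j → j < 2*n - 1 → t.getD j 0 = nodeSum F n j) →
    ∀ j, j < 2*n - 1 → (aBuildFold t c).getD j 0 = nodeSum F n j := by
  intro c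
  induction c with
  | zero => intro t _ _ ht j hj; exact ht j (by omega) hj
  | succ c ih =>
    intro t hc hlen ht j hj
    rw [aBuildFold]
    apply ih _ (by omega) (by rw [List.length_set]; exact hlen) _ j hj
    intro j' hc' hj'
    rw [getD_set_eq]
    by_cases hjc : c = j'
    · subst hjc
      rw [if_pos ⟨rfl, by omega⟩]
      rw [ht (2*c+1) (by omega) (by omega), ht (2*c+2) (by omega) (by omega)]
      conv_rhs => rw [nodeSum]
      rw [dif_neg (by omega)]
    · rw [if_neg (by intro h; exact hjc h.1)]
      exact ht j' (by omega) hj'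

lemma aBuild_valid (values : List Int) (F : Nat → Int) (hne : values ≠ [])
    (hF : ∀ idx, values.getD idx 0 = F idx) :
    ValidT F (2 ^ Nat.clog 2 values.length) (aBuild values).t := by
  have hlen : values.length ≤ 2 ^ Nat.clog 2 values.length :=
    Nat.le_pow_clog (by norm_num) _
  have hpos : 0 < values.length := List.length_pos_of_ne_nil hne
  set n := 2 ^ Nat.clog 2 values.length with hn
  have hn1 : 1 ≤ n := Nat.one_le_two_pow
  constructor
  · show (aBuildFold _ (n-1)).length = 2*n - 1
    rw [buildFold_length, setfold_length, List.length_replicate]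
  · intro j hj
    show (aBuildFold _ (n-1)).getD j 0 = nodeSum F n j
    apply buildFold_getD F n (n-1) _ (le_refl _)
      (by rw [setfold_length, List.length_replicate]) _ j hj
    intro j' h1 h2
    rw [setfold_getD]
    simp only [List.length_replicate, Nat.add_zero, Nat.sub_zero]
    conv_rhs => rw [nodeSum]
    rw [dif_pos (by omega : n - 1 ≤ j')]
    by_cases hwin : j' < n - 1 + values.length
    · rw [if_pos ⟨by omega, hwin, by omega⟩, hF]
    · rw [if_neg (by intro h; exact hwin h.2.1)]
      rw [← hF (j' - (n-1)),
        List.getD_eq_default values 0 (by omega : values.length ≤ j' - (n-1))]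
      simp

lemma blockS_zero (F : Nat → Int) (n a : Nat) : blockS F n a 0 = 0 := rfl

lemma blockS_back (F : Nat → Int) (n a m : Nat) :
    blockS F n a (m+1) = blockS F n a m + nodeSum F n (a + m) := by
  unfold blockS
  rw [List.range_succ, List.map_append, List.sum_append]
  simp

lemma blockS_front (F : Nat → Int) (n a m : Nat) :
    blockS F n a (m+1) = nodeSum F n a + blockS F n (a+1) m := by
  unfold blockS
  rw [List.range_succ_eq_map, List.map_cons, List.sum_cons, List.map_map]
  have h1 : ((List.range m).map ((fun i => nodeSum F n (a + i)) ∘ Nat.succ))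
      = (List.range m).map (fun i => nodeSum F n (a + 1 + i)) := by
    apply List.map_congr_left
    intro x _
    simp only [Function.comp_apply]
    congr 1
    omega
  rw [h1]
  simp

lemma blockS_pair (F : Nat → Int) (n : Nat) : ∀ (m a : Nat), a % 2 = 1 →
    (a-1)/2 + m ≤ n - 1 →
    blockS F n a (2*m) = blockS F n ((a-1)/2) m := by
  intro m
  induction m with
  | zero => intro a _ _; rfl
  | succ m ih =>
    intro a ha hb
    have h1 : 2*(m+1) = (2*m + 1) + 1 := by omega
    rw [h1, blockS_back, blockS_back, ih a ha (by omega), blockS_back]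
    have hq : ¬ (n - 1 ≤ (a-1)/2 + m) := by omega
    conv_rhs => rw [nodeSum]
    rw [dif_neg hq]
    have e1 : 2*((a-1)/2 + m) + 1 = a + 2*m := by omega
    have e2 : 2*((a-1)/2 + m) + 2 = a + (2*m+1) := by omega
    rw [e1, e2]
    ring

lemma blockS_leaf (F : Nat → Int) (n a : Nat) (ha : n - 1 ≤ a) : ∀ m,
    blockS F n a m = ((List.range m).map (fun t => F (a - (n-1) + t))).sum := by
  intro m
  induction m with
  | zero => rfl
  | succ m ih =>
    rw [blockS_back, ih, List.range_succ, List.map_append, List.sum_append]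
    simp only [List.map_cons, List.map_nil, List.sum_cons, List.sum_nil]
    conv_lhs => rw [nodeSum]
    rw [dif_pos (by omega)]
    have : a + m - (n-1) = a - (n-1) + m := by omega
    rw [this]
    simp

-- Source B's inner scan over range(a, b+1)
lemma bFold (vals : List Int) (a : Int) : ∀ (m : Nat),
    (PySem.List.pyRange a (a + (m:Int)) 1).foldl
      (fun (p : Int × Int) i => (p.1 + p.2 * PySem.List.pyGetD vals (i - 1) 0 * (i - a + 1), -p.2))
      (0, 1)
    = (((List.range m).map (fun (t : Nat) =>
          ((-1:Int))^t * PySem.List.pyGetD vals (a + (t:Int) - 1) 0 * ((t:Int) + 1))).sum,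
       ((-1:Int))^m) := by
  intro m
  induction m with
  | zero => simp [PySem.List.pyRange_one_eq_nil]
  | succ m ih =>
    have hsplit : PySem.List.pyRange a (a + ((m+1 : Nat) : Int)) 1
        = PySem.List.pyRange a (a + (m:Int)) 1 ++ [a + (m:Int)] := by
      have h2 := PySem.List.pyRange_one_succ_right (a := a) (b := a + (m:Int)) (by omega)
      rw [show (a + ((m+1 : Nat) : Int)) = a + (m:Int) + 1 by push_cast; ring]
      exact h2
    rw [hsplit, List.foldl_append, ih, List.foldl_cons, List.foldl_nil]
    rw [List.range_succ, List.map_append, List.sum_append]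
    simp only [List.map_cons, List.map_nil, List.sum_cons, List.sum_nil, Prod.mk.injEq]
    refine ⟨by push_cast; ring_nf, by rw [pow_succ]; ring⟩

-- merging a full block of sibling pairs into their parents
lemma blockS_parent (F : Nat → Int) (n : Nat) (l0 r0 : Nat) (hodd : l0 % 2 = 1)
    (heven : r0 % 2 = 0) (hle : l0 ≤ r0) (hr : (r0-1)/2 ≤ n - 2) (hn : 2 ≤ n) :
    blockS F n l0 (r0+1-l0) = blockS F n ((l0-1)/2) ((r0-1)/2 + 1 - (l0-1)/2) := by
  have hm := blockS_pair F n ((r0+1-l0)/2) l0 hodd (by omega)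
  rw [show r0+1-l0 = 2*((r0+1-l0)/2) by omega, hm,
    show (r0-1)/2 + 1 - (l0-1)/2 = (r0+1-l0)/2 by omega]

-- the bottom-up query loop computes the block sum of the visited level
lemma queryLoop_eq (F : Nat → Int) (k : Nat) (t : List Int)
    (hv : ValidT F (2^k) t) :
    ∀ (d : Nat), d ≤ k → ∀ (L R : Nat) (acc : Int),
      2^d - 1 ≤ L → L ≤ 2^(d+1) - 2 → 2^d - 1 ≤ R → R ≤ 2^(d+1) - 2 →
      aQueryLoop t (L : Int) (R : Int) acc = acc + blockS F (2^k) L (R + 1 - L) := by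
  obtain ⟨hlen, hval⟩ := hv
  have hn1 : 1 ≤ 2^k := Nat.one_le_two_pow
  have hb1 : ∀ a : Nat, blockS F (2^k) a 1 = nodeSum F (2^k) a := by
    intro a; simp [blockS, List.range_one]
  have hb2 : ∀ a : Nat, blockS F (2^k) a 2 = nodeSum F (2^k) a + nodeSum F (2^k) (a+1) := by
    intro a
    rw [show (2:Nat) = 1 + 1 from rfl, blockS_back, hb1]
  intro d
  induction d with
  | zero =>
    intro _ L R acc hL1 hL2 hR1 hR2
    have hL0 : L = 0 := by simp at hL2; omega
    have hR0 : R = 0 := by simp at hR2; omega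
    subst hL0; subst hR0
    rw [aQueryLoop, dif_pos (by norm_num)]
    simp only [Nat.cast_zero]
    norm_num [show PySem.Int.mod 0 2 = 0 by decide,
      show PySem.Int.floordiv (0 + 1 - 1) 2 = 0 by decide,
      show PySem.Int.floordiv (0 - 1) 2 = -1 by decide]
    rw [aQueryLoop, dif_neg (by norm_num)]
    rw [show PySem.List.pyGetD t 0 0 = t.getD 0 0 from PySem.List.pyGetD_zero ..,
      hval 0 (by omega), hb1 0]
    try ring
  | succ d ih =>
    intro hd L R acc hL1 hL2 hR1 hR2
    have hp : 2^(d+1) = 2*2^d := by ring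
    have hp2 : 2^(d+2) = 2*2^(d+1) := by ring
    have hposd : 1 ≤ 2^d := Nat.one_le_two_pow
    have hkb : 2^(d+1) ≤ 2^k := Nat.pow_le_pow_right (by norm_num) (by omega)
    by_cases hLR : L ≤ R
    · have hml : PySem.Int.mod (L:Int) 2 = ((L % 2 : Nat) : Int) := by
        rw [PySem.Int.mod_eq_emod_of_pos (by norm_num)]; omega
      have hmr : PySem.Int.mod (R:Int) 2 = ((R % 2 : Nat) : Int) := by
        rw [PySem.Int.mod_eq_emod_of_pos (by norm_num)]; omega
      have hgl : (t[L]?).getD 0 = nodeSum F (2^k) L := by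
        rw [← List.getD_eq_getElem?_getD]; exact hval L (by omega)
      have hgr : (t[R]?).getD 0 = nodeSum F (2^k) R := by
        rw [← List.getD_eq_getElem?_getD]; exact hval R (by omega)
      rw [aQueryLoop, dif_pos (by exact_mod_cast hLR)]
      rcases Nat.mod_two_eq_zero_or_one L with hpl | hpl <;>
        rcases Nat.mod_two_eq_zero_or_one R with hpr | hpr
      · -- L even, R even: l0 = L+1, r0 = R
        simp only [hml, hmr, hpl, hpr, Nat.cast_zero, Nat.cast_one]
        norm_num
        rw [show ((L:Int) / 2) = ((L/2 : Nat) : Int) by omega,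
          show (((R:Int) - 1) / 2) = (((R-2)/2 : Nat) : Int) by omega, hgl]
        by_cases hstop : R ≤ L
        · have hReq : R = L := by omega
          rw [aQueryLoop, dif_neg (by omega)]
          rw [hReq, show L + 1 - L = 1 from by omega, hb1 L]
          try ring
        · have ha1 : 2^d - 1 ≤ L/2 := by omega
          have ha2 : L/2 ≤ 2^(d+1) - 2 := by omega
          have ha3 : 2^d - 1 ≤ (R-2)/2 := by omega
          have ha4 : (R-2)/2 ≤ 2^(d+1) - 2 := by omega
          rw [ih (by omega) (L/2) ((R-2)/2) _ ha1 ha2 ha3 ha4]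
          rw [show R + 1 - L = (R - L) + 1 by omega, blockS_front]
          have hpar := blockS_parent F (2^k) (L+1) R (by omega) hpr (by omega)
            (by omega) (by omega)
          rw [show R + 1 - (L+1) = R - L by omega, show (L+1-1)/2 = L/2 by omega,
            show (R-1)/2 = (R-2)/2 by omega] at hpar
          rw [← hpar]
          try ring
      · -- L even, R odd: l0 = L+1, r0 = R-1
        simp only [hml, hmr, hpl, hpr, Nat.cast_zero, Nat.cast_one]
        norm_num
        rw [show ((L:Int) / 2) = ((L/2 : Nat) : Int) by omega, hgl, hgr]
        by_cases hstop : R ≤ L + 1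
        · have hReq : R = L + 1 := by omega
          rw [show (((R:Int) - 1 - 1) / 2) = (((R-2)/2 : Nat) : Int) by omega]
          rw [aQueryLoop, dif_neg (by omega)]
          rw [hReq, show L + 1 + 1 - L = 2 from by omega, hb2 L]
          try ring
        · rw [show (((R:Int) - 1 - 1) / 2) = (((R-3)/2 : Nat) : Int) by omega]
          have ha1 : 2^d - 1 ≤ L/2 := by omega
          have ha2 : L/2 ≤ 2^(d+1) - 2 := by omega
          have ha3 : 2^d - 1 ≤ (R-3)/2 := by omega
          have ha4 : (R-3)/2 ≤ 2^(d+1) - 2 := by omega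
          rw [ih (by omega) (L/2) ((R-3)/2) _ ha1 ha2 ha3 ha4]
          rw [show R + 1 - L = (R - L - 1) + 1 + 1 by omega, blockS_front, blockS_back]
          rw [show L + 1 + (R - L - 1) = R from by omega]
          have hpar := blockS_parent F (2^k) (L+1) (R-1) (by omega) (by omega) (by omega)
            (by omega) (by omega)
          rw [show R - 1 + 1 - (L+1) = R - L - 1 by omega, show (L+1-1)/2 = L/2 by omega,
            show (R-1-1)/2 = (R-3)/2 by omega] at hpar
          rw [← hpar]
          try ring
      · -- L odd, R even: l0 = L, r0 = R, no edge terms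
        simp only [hml, hmr, hpl, hpr, Nat.cast_zero, Nat.cast_one]
        norm_num
        rw [show (((L:Int) - 1) / 2) = (((L-1)/2 : Nat) : Int) by omega,
          show (((R:Int) - 1) / 2) = (((R-2)/2 : Nat) : Int) by omega]
        have ha1 : 2^d - 1 ≤ (L-1)/2 := by omega
        have ha2 : (L-1)/2 ≤ 2^(d+1) - 2 := by omega
        have ha3 : 2^d - 1 ≤ (R-2)/2 := by omega
        have ha4 : (R-2)/2 ≤ 2^(d+1) - 2 := by omega
        rw [ih (by omega) ((L-1)/2) ((R-2)/2) _ ha1 ha2 ha3 ha4]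
        have hpar := blockS_parent F (2^k) L R hpl hpr (by omega) (by omega) (by omega)
        rw [show (R-1)/2 = (R-2)/2 by omega] at hpar
        rw [← hpar]
      · -- L odd, R odd: l0 = L, r0 = R-1
        simp only [hml, hmr, hpl, hpr, Nat.cast_zero, Nat.cast_one]
        norm_num
        rw [show (((L:Int) - 1) / 2) = (((L-1)/2 : Nat) : Int) by omega, hgr]
        by_cases hstop : R ≤ L
        · have hReq : R = L := by omega
          rw [show (((R:Int) - 1 - 1) / 2) = (((R:Int) - 2) / 2) by ring_nf]
          rw [aQueryLoop, dif_neg (by omega)]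
          rw [hReq, show L + 1 - L = 1 from by omega, hb1 L]
          try ring
        · rw [show (((R:Int) - 1 - 1) / 2) = (((R-3)/2 : Nat) : Int) by omega]
          have ha1 : 2^d - 1 ≤ (L-1)/2 := by omega
          have ha2 : (L-1)/2 ≤ 2^(d+1) - 2 := by omega
          have ha3 : 2^d - 1 ≤ (R-3)/2 := by omega
          have ha4 : (R-3)/2 ≤ 2^(d+1) - 2 := by omega
          rw [ih (by omega) ((L-1)/2) ((R-3)/2) _ ha1 ha2 ha3 ha4]
          rw [show R + 1 - L = (R - L) + 1 by omega, blockS_back]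
          rw [show L + (R - L) = R from by omega]
          have hpar := blockS_parent F (2^k) L (R-1) hpl (by omega) (by omega)
            (by omega) (by omega)
          rw [show R - 1 + 1 - L = R - L by omega,
            show (R-1-1)/2 = (R-3)/2 by omega] at hpar
          rw [← hpar]
          try ring
    · rw [aQueryLoop, dif_neg (by exact_mod_cast hLR)]
      rw [show R + 1 - L = 0 by omega, blockS_zero]
      try ring

lemma sum_linear : ∀ (l : List Nat) (f g h : Nat → Int) (c s : Int),
    (∀ x ∈ l, s * (f x - c * g x) = h x) →
    s * ((l.map f).sum - c * (l.map g).sum) = (l.map h).sum := by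
  intro l
  induction l with
  | nil => intro f g h c s _; simp
  | cons y l ih =>
    intro f g h c s hpt
    simp only [List.map_cons, List.sum_cons]
    have h1 := hpt y (by simp)
    have h2 := ih f g h c s (fun x hx => hpt x (by simp [hx]))
    linear_combination h1 + h2

-- one 'Q' query: A's segment-tree score equals B's direct alternating scan
lemma score_eq (vals : List Int) (k : Nat) (T1 T2 : ASeg)
    (hpos : 0 < vals.length) (hlk : vals.length ≤ 2^k)
    (hT1 : T1.n = 2^k) (hT2 : T2.n = 2^k)
    (hv1 : ValidT (leafF aF1 vals) (2^k) T1.t) (hv2 : ValidT (leafF aF2 vals) (2^k) T2.t)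
    (a b : Int) (ha : 1 ≤ a) (hb : a ≤ b → b ≤ (vals.length : Int)) :
    aScore T1 T2 a b
      = ((PySem.List.pyRange a (b + 1) 1).foldl
          (fun (p : Int × Int) i =>
            (p.1 + p.2 * PySem.List.pyGetD vals (i - 1) 0 * (i - a + 1), -p.2))
          (0, 1)).1 := by
  obtain ⟨n1, t1⟩ := T1
  obtain ⟨n2, t2⟩ := T2
  simp only at hT1 hT2 hv1 hv2
  subst hT1; subst hT2
  have hn1 : 1 ≤ 2^k := Nat.one_le_two_pow
  have hpk : 2^(k+1) = 2*2^k := by ring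
  by_cases hab : a ≤ b
  · have hblen := hb hab
    set A := (a - 1).toNat with hA
    set B' := (b - 1).toNat with hB
    set m := (b + 1 - a).toNat with hm
    set L := (2^k - 1) + A with hL
    set R := (2^k - 1) + B' with hR
    simp only [aScore, aQuery]
    rw [show (a - 1 + ((2^k : Nat):Int) - 1) = ((L : Nat) : Int) by omega,
      show (b - 1 + ((2^k : Nat):Int) - 1) = ((R : Nat) : Int) by omega]
    rw [queryLoop_eq (leafF aF2 vals) k t2 hv2 k le_rfl L R 0
        (by omega) (by omega) (by omega) (by omega),
      queryLoop_eq (leafF aF1 vals) k t1 hv1 k le_rfl L R 0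
        (by omega) (by omega) (by omega) (by omega)]
    rw [show R + 1 - L = m by omega]
    rw [blockS_leaf (leafF aF2 vals) (2^k) L (by omega) m,
      blockS_leaf (leafF aF1 vals) (2^k) L (by omega) m]
    rw [show L - (2^k - 1) = A by omega]
    rw [show b + 1 = a + (m : Int) by omega, bFold vals a m]
    simp only [zero_add]
    apply sum_linear
    intro x hx
    have hxm : x < m := List.mem_range.mp hx
    have hidx : A + x < vals.length := by omega
    simp only [leafF, if_pos hidx]
    rw [show a + (x:Int) - 1 = ((A + x : Nat) : Int) by omega,
      PySem.List.pyGetD_natCast]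
    unfold aF1 aF2
    rw [show (((A + x : Nat) : Int) + 1 - 1).toNat = A + x by omega,
      show ((A + x : Nat) : Int) = (a - 1) + (x : Int) by omega,
      show (a - 1).toNat = A from rfl]
    have hpow : ((-1:Int))^A * (-1)^(A+x) = (-1)^x := by
      rw [← pow_add, show A + (A+x) = 2*A+x by ring, pow_add, pow_mul]
      norm_num
    set v := vals.getD (A + x) 0
    calc ((-1:Int))^A * ((-1)^(A+x) * v * (a - 1 + (x:Int) + 1) - (a-1) * ((-1)^(A+x) * v))
        = ((-1:Int))^A * (-1)^(A+x) * (v * ((x:Int)+1)) := by ring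
      _ = (-1)^x * v * ((x:Int)+1) := by rw [hpow]; ring
  · rw [show PySem.List.pyRange a (b + 1) 1 = [] from
      PySem.List.pyRange_one_eq_nil (by omega)]
    simp only [List.foldl_nil]
    simp only [aScore, aQuery]
    rw [aQueryLoop, dif_neg (by omega), aQueryLoop, dif_neg (by omega)]
    ring

lemma leafF_set (f : Int → Int → Int) (vals : List Int) (i : Nat) (v : Int)
    (hi : i < vals.length) (x : Nat) :
    leafF f (vals.set i v) x = if x = i then f ((i:Int)+1) v else leafF f vals x := by
  by_cases hx : x = i
  · subst hx
    simp [leafF, List.length_set, getD_set_eq, hi]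
  · have hgd : (vals.set i v)[x]? = vals[x]? :=
      List.getElem?_set_ne (fun h => hx h.symm)
    simp [leafF, List.length_set, hgd, hx]

-- A's point update keeps the tree valid for the pointwise-updated value list
lemma update_valid (f : Int → Int → Int) (vals : List Int) (k : Nat) (t : List Int)
    (hlk : vals.length ≤ 2^k)
    (hv : ValidT (leafF f vals) (2^k) t) (a v : Int)
    (ha : 1 ≤ a) (hb : a ≤ (vals.length : Int)) :
    ValidT (leafF f (vals.set (a-1).toNat v)) (2^k)
      (aUpdLoop t ((a - 1) + ((2^k : Nat) : Int) - 1)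
        (f a v - PySem.List.pyGetD t ((a - 1) + ((2^k : Nat) : Int) - 1) 0)) := by
  obtain ⟨hl, hval⟩ := hv
  have hn1 : 1 ≤ 2^k := Nat.one_le_two_pow
  set idx := (a - 1).toNat with hidx
  have hidxlt : idx < vals.length := by omega
  set e := (2^k - 1) + idx with he
  have hcast : (a - 1) + ((2^k : Nat) : Int) - 1 = ((e : Nat) : Int) := by omega
  have hget : PySem.List.pyGetD t ((e : Nat) : Int) 0
      = f ((idx : Int) + 1) (vals.getD idx 0) := by
    rw [PySem.List.pyGetD_natCast, hval e (by omega)]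
    rw [nodeSum, dif_pos (by omega : 2^k - 1 ≤ e), show e - (2^k - 1) = idx by omega]
    simp [leafF, hidxlt]
  have hae : ((idx : Int) + 1) = a := by omega
  constructor
  · rw [updLoop_length]; exact hl
  · intro j hj
    rw [hcast, updLoop_getD e t _ j (by omega) (by omega), hval j hj]
    have hns := nodeSum_update (leafF f vals) (2^k) idx (f ((idx:Int)+1) v)
      (by omega) (by omega) j
    have hcongr : nodeSum (leafF f (vals.set idx v)) (2^k) j
        = nodeSum (fun x => if x = idx then f ((idx:Int)+1) v else leafF f vals x) (2^k) j := by
      have : leafF f (vals.set idx v)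
          = (fun x => if x = idx then f ((idx:Int)+1) v else leafF f vals x) :=
        funext (leafF_set f vals idx v hidxlt)
      rw [this]
    have hFi : leafF f vals idx = f ((idx:Int)+1) (vals.getD idx 0) := by
      simp [leafF, hidxlt]
    rw [← he] at hns
    rw [hcongr, hns, hget, hFi, ← hae]

-- the whole query loop: A's (tree1, tree2, answer) state vs B's (vals, answer) state
lemma mainFold (len0 k : Nat) (hpos : 0 < len0) (hlk : len0 ≤ 2^k) :
    ∀ (qs : List (String × Int × Int)) (vals : List Int) (T1 T2 : ASeg) (ans : Int),
      vals.length = len0 → T1.n = 2^k → T2.n = 2^k →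
      ValidT (leafF aF1 vals) (2^k) T1.t → ValidT (leafF aF2 vals) (2^k) T2.t →
      (∀ q ∈ qs,
        (q.1 = "Q" → 1 ≤ q.2.1 ∧ (q.2.1 ≤ q.2.2 → q.2.2 ≤ (len0 : Int))) ∧
        (q.1 = "U" → 1 ≤ q.2.1 ∧ q.2.1 ≤ (len0 : Int))) →
      (qs.foldl (fun (st : ASeg × ASeg × Int) q =>
          if q.1 = "Q" then
            (st.1, st.2.1, st.2.2 + aScore st.1 st.2.1 q.2.1 q.2.2)
          else if q.1 = "U" then
            (aUpdate st.1 (q.2.1 - 1) (aF1 q.2.1 q.2.2),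
             aUpdate st.2.1 (q.2.1 - 1) (aF2 q.2.1 q.2.2),
             st.2.2)
          else st) (T1, T2, ans)).2.2
      = (qs.foldl (fun (st : List Int × Int) q =>
          if q.1 = "Q" then
            (st.1, st.2 + ((PySem.List.pyRange q.2.1 (q.2.2 + 1) 1).foldl
              (fun (p : Int × Int) i =>
                (p.1 + p.2 * PySem.List.pyGetD st.1 (i - 1) 0 * (i - q.2.1 + 1), -p.2))
              (0, 1)).1)
          else if q.1 = "U" then (PySem.List.pySetD st.1 (q.2.1 - 1) q.2.2, st.2)
          else st) (vals, ans)).2 := by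
  intro qs
  induction qs with
  | nil => intro vals T1 T2 ans _ _ _ _ _ _; rfl
  | cons q qs ih =>
    intro vals T1 T2 ans hlen hT1 hT2 hv1 hv2 hq
    obtain ⟨n1, t1⟩ := T1
    obtain ⟨n2, t2⟩ := T2
    simp only at hT1 hT2 hv1 hv2
    subst hT1; subst hT2
    have hqh := hq q (by simp)
    have hqt : ∀ q' ∈ qs, _ := fun q' hq' => hq q' (by simp [hq'])
    simp only [List.foldl_cons]
    by_cases hQ : q.1 = "Q"
    · rw [if_pos hQ, if_pos hQ]
      have hsc := score_eq vals k ⟨2^k, t1⟩ ⟨2^k, t2⟩ (by omega) (by omega) rfl rfl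
        hv1 hv2 q.2.1 q.2.2 (hqh.1 hQ).1 (fun h => hlen ▸ (hqh.1 hQ).2 h)
      simp only [hsc]
      exact ih vals ⟨2^k, t1⟩ ⟨2^k, t2⟩ _ hlen rfl rfl hv1 hv2 hqt
    · rw [if_neg hQ, if_neg hQ]
      by_cases hU : q.1 = "U"
      · rw [if_pos hU, if_pos hU]
        have ha := (hqh.2 hU).1
        have hbv : q.2.1 ≤ (vals.length : Int) := by rw [hlen]; exact (hqh.2 hU).2
        have hu1 := update_valid aF1 vals k t1 (by omega) hv1 q.2.1 q.2.2 ha hbv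
        have hu2 := update_valid aF2 vals k t2 (by omega) hv2 q.2.1 q.2.2 ha hbv
        have hset : PySem.List.pySetD vals (q.2.1 - 1) q.2.2
            = vals.set (q.2.1 - 1).toNat q.2.2 :=
          PySem.List.pySetD_of_nonneg vals q.2.2 (by omega)
        rw [hset]
        simp only [aUpdate]
        exact ih (vals.set (q.2.1 - 1).toNat q.2.2) _ _ ans
          (by rw [List.length_set]; exact hlen) rfl rfl hu1 hu2 hqt
      · rw [if_neg hU, if_neg hU]
        exact ih vals ⟨2^k, t1⟩ ⟨2^k, t2⟩ ans hlen rfl rfl hv1 hv2 hqt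

-- the comprehension A builds its leaves from, read through leafF
lemma values_getD (f : Int → Int → Int) (vals : List Int) (idx : Nat) :
    (vals.zipIdx.map (fun p => f ((p.2 : Int) + 1) p.1)).getD idx 0 = leafF f vals idx := by
  unfold leafF
  rw [List.getD_eq_getElem?_getD, List.getElem?_map, List.getElem?_zipIdx]
  by_cases h : idx < vals.length
  · rw [List.getElem?_eq_getElem h]
    simp [List.getD_eq_getElem?_getD, List.getElem?_eq_getElem h, h]
  · rw [List.getElem?_eq_none (by omega)]
    simp [h]

-- aBuild applied to A's build comprehension, packaged once (cheap to instantiate)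
lemma aBuild_valid2 (f : Int → Int → Int) (vals : List Int)
    (hne : (vals.zipIdx.map (fun p => f ((p.2 : Int) + 1) p.1)) ≠ []) :
    ValidT (leafF f vals)
      (2 ^ Nat.clog 2 (vals.zipIdx.map (fun p => f ((p.2 : Int) + 1) p.1)).length)
      (aBuild (vals.zipIdx.map (fun p => f ((p.2 : Int) + 1) p.1))).t :=
  aBuild_valid _ _ hne (values_getD f vals)

-- ===== VERDICT (by name: the statement is the Claim_ definition above) =====
set_option maxHeartbeats 1000000 in
theorem solve_spec : Claim_equal_solve := by
  intro N Q candies queries _ hpre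
  obtain ⟨hne, hq⟩ := hpre
  have hpos : 0 < candies.length := List.length_pos_of_ne_nil hne
  have hlk : candies.length ≤ 2 ^ Nat.clog 2 candies.length :=
    Nat.le_pow_clog (by norm_num) _
  show solve N Q candies queries = solve_alt N Q candies queries
  simp only [solve, solve_alt]
  have hlen1 : (candies.zipIdx.map (fun p => aF1 ((p.2 : Int) + 1) p.1)).length
      = candies.length := by simp
  have hlen2 : (candies.zipIdx.map (fun p => aF2 ((p.2 : Int) + 1) p.1)).length
      = candies.length := by simp
  have hne1 : (candies.zipIdx.map (fun p => aF1 ((p.2 : Int) + 1) p.1)) ≠ [] := by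
    rw [← List.length_pos_iff, hlen1]; exact hpos
  have hne2 : (candies.zipIdx.map (fun p => aF2 ((p.2 : Int) + 1) p.1)) ≠ [] := by
    rw [← List.length_pos_iff, hlen2]; exact hpos
  have hv1 := aBuild_valid2 aF1 candies hne1
  have hv2 := aBuild_valid2 aF2 candies hne2
  rw [hlen1] at hv1
  rw [hlen2] at hv2
  have hn1 : (aBuild (candies.zipIdx.map (fun p => aF1 ((p.2 : Int) + 1) p.1))).n
      = 2 ^ Nat.clog 2 candies.length := by
    show 2 ^ Nat.clog 2 (candies.zipIdx.map (fun p => aF1 ((p.2 : Int) + 1) p.1)).length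
        = 2 ^ Nat.clog 2 candies.length
    rw [hlen1]
  have hn2 : (aBuild (candies.zipIdx.map (fun p => aF2 ((p.2 : Int) + 1) p.1))).n
      = 2 ^ Nat.clog 2 candies.length := by
    show 2 ^ Nat.clog 2 (candies.zipIdx.map (fun p => aF2 ((p.2 : Int) + 1) p.1)).length
        = 2 ^ Nat.clog 2 candies.length
    rw [hlen2]
  generalize hT1 : aBuild (candies.zipIdx.map (fun p => aF1 ((p.2 : Int) + 1) p.1)) = T1 at hv1 hn1 ⊢
  generalize hT2 : aBuild (candies.zipIdx.map (fun p => aF2 ((p.2 : Int) + 1) p.1)) = T2 at hv2 hn2 ⊢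
  exact mainFold candies.length (Nat.clog 2 candies.length) hpos hlk queries
    candies T1 T2 0 rfl hn1 hn2 hv1 hv2 hq
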